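-- pv_equiv track=rewrite | github.com/nao7sep/shared | apps/polychat/src/polychat/domain/chat.py | _text_to_lines
-- ===== SOURCE A (Python) =====
-- def _text_to_lines(text: str) -> list[str]:
--     """Convert multiline text to line array with trimming."""
--     lines = text.split("\n")
--
--     start = 0
--     for index, line in enumerate(lines):
--         if line.strip():
--             start = index
--             break
--     else:
--         return []
--
--     end = len(lines)
--     for index in range(len(lines) - 1, -1, -1):
--         if lines[index].strip():
--             end = index + 1
--             break
--
--     return lines[start:end]
-- ===== SOURCE B (Python) =====
-- def _text_to_lines(text: str) -> list[str]:
--     """Convert multiline text to line array with trimming."""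
--     lines = text.split("\n")
--     idxs = [i for i, line in enumerate(lines) if line.strip()]
--     if not idxs:
--         return []
--     return lines[idxs[0]:idxs[-1] + 1]
-- ===== Notes on version B (the rewrite author's own statement) =====
-- stated objective: simpler
-- what changed: Replaces the two directional break-scans (forward for the first non-blank line, backward for the last) with one pass that records all non-blank line indices, then slices from the first to the last recorded index.
import Mathlib
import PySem

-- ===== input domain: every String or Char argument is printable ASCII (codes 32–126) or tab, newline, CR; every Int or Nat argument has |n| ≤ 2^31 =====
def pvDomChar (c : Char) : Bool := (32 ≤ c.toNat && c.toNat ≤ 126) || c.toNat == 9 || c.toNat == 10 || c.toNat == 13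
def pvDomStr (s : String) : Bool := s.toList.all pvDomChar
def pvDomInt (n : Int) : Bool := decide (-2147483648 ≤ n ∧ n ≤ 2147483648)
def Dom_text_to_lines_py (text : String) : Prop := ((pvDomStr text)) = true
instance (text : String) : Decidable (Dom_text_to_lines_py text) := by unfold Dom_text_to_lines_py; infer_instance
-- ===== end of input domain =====

-- B replaces A's two directional break-scans by one pass collecting the non-blank line
-- indices and a closed-form slice from the first to the last of them (objective: simpler).

-- ===== PORT A =====
-- A's first loop: enumerate(lines), break at the first line with non-empty strip.
def pvAStart : List (Int × String) → Option Int
  | [] => none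
  | (i, line) :: rest => if PySem.Str.strip line ≠ "" then some i else pvAStart rest

-- A's second loop: scan indices from len-1 down to -1 exclusive, break at the first
-- non-blank line; default end = len(lines).
def pvAEnd (lines : List String) : List Int → Int
  | [] => (lines.length : Int)
  | i :: rest =>
      if PySem.Str.strip (PySem.List.pyGetD lines i "") ≠ "" then i + 1 else pvAEnd lines rest

def text_to_lines_py (text : String) : List String :=
  let lines := (PySem.Str.split? text "\n").getD []
  match pvAStart (PySem.List.enumerate lines 0) with
  | none => []
  | some start =>
      let e := pvAEnd lines (PySem.List.pyRange ((lines.length : Int) - 1) (-1) (-1))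
      PySem.List.slice lines (some start) (some e)

-- ===== PORT B =====
def text_to_lines_py_alt (text : String) : List String :=
  let lines := (PySem.Str.split? text "\n").getD []
  let idxs := ((PySem.List.enumerate lines 0).filter
                 (fun p => PySem.Str.strip p.2 ≠ "")).map Prod.fst
  match idxs with
  | [] => []
  | i :: _ => PySem.List.slice lines (some i) (some (idxs.getLast! + 1))

-- ===== PRECONDITION & SPEC =====
def Spec_text_to_lines_py (text : String) (out : List String) : Prop := out = text_to_lines_py_alt text
instance (text : String) (out : List String) : Decidable (Spec_text_to_lines_py text out) := by unfold Spec_text_to_lines_py; infer_instance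

-- ===== CLAIM (what is proved, stated in full; the proofs are below) =====
def Claim_equal_text_to_lines_py : Prop := ∀ (text : String), Dom_text_to_lines_py text → Spec_text_to_lines_py text (text_to_lines_py text)

-- ===== LEMMAS AND PROOFS =====

-- the non-blank index list B builds, over arbitrary lines
def pvIdxs (L : List String) (s : Int) : List Int :=
  ((PySem.List.enumerate L s).filter (fun p => PySem.Str.strip p.2 ≠ "")).map Prod.fst

theorem pvStart_eq (L : List String) : ∀ (s : Int),
    pvAStart (PySem.List.enumerate L s) = (pvIdxs L s).head? := by
  induction L with
  | nil => intro s; simp [pvAStart, pvIdxs, PySem.List.enumerate_nil]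
  | cons x xs ih =>
      intro s
      simp only [PySem.List.enumerate_cons, pvAStart, pvIdxs, List.filter_cons]
      by_cases h : PySem.Str.strip x ≠ ""
      · simp [h]
      · simpa [h, pvIdxs] using ih (s + 1)

theorem pvIdxs_take_succ (L : List String) (n : Nat) (hn : n < L.length) :
    pvIdxs (L.take (n + 1)) 0 =
      pvIdxs (L.take n) 0 ++
        (if PySem.Str.strip L[n] ≠ "" then [(n : Int)] else []) := by
  have ht : L.take (n + 1) = L.take n ++ [L[n]] := List.take_succ_eq_append_getElem hn
  simp only [pvIdxs, ht, PySem.List.enumerate_append, List.filter_append, List.map_append,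
    PySem.List.enumerate_cons, PySem.List.enumerate_nil, List.filter_cons]
  by_cases h : PySem.Str.strip L[n] ≠ "" <;>
    simp [h, List.length_take, Nat.min_eq_left (Nat.le_of_lt hn)]

theorem pvEnd_eq (L : List String) : ∀ (n : Nat), n ≤ L.length →
    pvAEnd L (PySem.List.pyRange ((n : Int) - 1) (-1) (-1)) =
      match (pvIdxs (L.take n) 0).getLast? with
      | some j => j + 1
      | none => (L.length : Int) := by
  intro n
  induction n with
  | zero =>
      intro _
      rw [PySem.List.pyRange_neg_one_eq_nil (by omega)]
      simp [pvAEnd, pvIdxs, PySem.List.enumerate_nil]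
  | succ n ih =>
      intro hn
      have hn' : n < L.length := hn
      have hcast : ((n + 1 : Nat) : Int) - 1 = (n : Int) := by push_cast; ring
      rw [hcast, PySem.List.pyRange_neg_one_cons (by omega)]
      simp only [pvAEnd]
      rw [pvIdxs_take_succ L n hn']
      have hget : PySem.List.pyGetD L (n : Int) "" = L[n] := by
        rw [PySem.List.pyGetD_natCast]
        simp [List.getElem?_eq_getElem hn']
      by_cases h : PySem.Str.strip L[n] ≠ ""
      · simp [hget, h]
      · rw [if_neg (by simp [hget]; simpa using h)]
        rw [ih (Nat.le_of_lt hn')]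
        simp [h]

theorem pvGetLast!_eq (i : Int) (rest : List Int) (h : i :: rest ≠ []) :
    (i :: rest).getLast! = (i :: rest).getLast h := by
  induction rest generalizing i with
  | nil => rfl
  | cons j t ih => simp [List.getLast!, List.getLast]

theorem text_to_lines_py_eq_alt (text : String) :
    text_to_lines_py text = text_to_lines_py_alt text := by
  unfold text_to_lines_py text_to_lines_py_alt
  generalize (PySem.Str.split? text "\n").getD [] = L
  dsimp only
  have hstart := pvStart_eq L 0
  have hend := pvEnd_eq L L.length (le_refl _)
  rw [List.take_length] at hend
  simp only [pvIdxs] at hstart hend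
  rw [hstart, hend]
  cases hc : ((PySem.List.enumerate L 0).filter (fun p => PySem.Str.strip p.2 ≠ "")).map Prod.fst with
  | nil => simp
  | cons i rest =>
      simp only [List.head?_cons]
      have hne : i :: rest ≠ [] := by simp
      rw [List.getLast?_eq_some_getLast hne]
      rw [pvGetLast!_eq i rest hne]

-- ===== VERDICT (by name: the statement is the Claim_ definition above) =====
theorem text_to_lines_py_spec : Claim_equal_text_to_lines_py := by
  intro text _
  exact text_to_lines_py_eq_alt text
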